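-- pv_equiv track=rewrite | github.com/chris-henry-holland/python-ProjectEulerSolutions | venv/lib/python3.11/site-packages/graph_classes/utils.py | getIthMultiset
-- ===== SOURCE A (Python) =====
-- from typing import (
--     Dict,
--     List,
--     Set,
--     Tuple,
--     Optional,
--     Hashable,
--     Generator,
--     Any,
--     Callable,
--     Iterable,
-- )
-- import math
--
-- def countFunctionNondecreasing(n: int, k: int) -> int:
--     return math.comb(n + k - 1, k)
--
-- def countFunctionIncreasing(n: int, k: int) -> int:
--     return math.comb(n, k)
--
-- def getIthNondecreasingKTuple(i: int, n: int, k: int,\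
--         allow_repeats: bool) -> Tuple[int]:
--
--     count_func = countFunctionNondecreasing if allow_repeats else\
--             countFunctionIncreasing
--
--     if i < 0 or i >= count_func(n, k):
--         raise ValueError("In the function "\
--                 "getIthNondecreasingKTuple(), the given value "\
--                 "of i was outside the valid range for the "\
--                 "given n and k.")
--
--     res = []
--     def recur(i: int, n: int, k: int, prev: int) -> None:
--         if not k: return
--         tot = count_func(n, k)
--         target = tot - i
--         lft, rgt = 0, n - 1
--         while lft < rgt:
--             mid = lft - ((lft - rgt) >> 1)
--             #if tot - countFunction(n - mid, k) <= i:
--             if count_func(n - mid, k) >= target: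
--                 lft = mid
--             else: rgt = mid - 1
--         num = prev + lft
--         res.append(num)
--         lft2 = lft + (not allow_repeats)
--         recur(count_func(n - lft, k) - target, n - lft2, k - 1,\
--                 num + (not allow_repeats))
--         return
--
--     recur(i, n, k, 0)
--     return tuple(res)
--
-- def getIthMultiset(i: int, n: int, k: int) -> Dict[int, int]:
--     res = {}
--     for num in getIthNondecreasingKTuple(i, n, k, allow_repeats=True):
--         res[num] = res.get(num, 0) + 1
--     return res
--     """
--     def countFunction(n: int, k: int) -> int:
--         return sp.comb(n + k - 1, k, exact=True)
--
--     if i < 0 or i >= countFunction(n, k):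
--         raise ValueError("In the function getIthMultiset(), i must "\
--                 "be no less than 0 and strictly less than "\
--                 "(n + k - 1) choose k")
--
--     res = {}
--     def recur(i: int, n: int, k: int, prev: int) -> None:
--         if not k: return
--         tot = countFunction(n, k)
--         target = tot - i
--         lft, rgt = 0, n - 1
--         while lft < rgt:
--             mid = lft - ((lft - rgt) >> 1)
--             #if tot - countFunction(n - mid, k) <= i:
--             if countFunction(n - mid, k) >= target:
--                 lft = mid
--             else: rgt = mid - 1
--         num = prev + lft
--         res[num] = res.get(num, 0) + 1
--         recur(countFunction(n - lft, k) - target, n - lft, k - 1, num)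
--         return
--
--     recur(i, n, k, 0)
--     return res
--     """
-- ===== SOURCE B (Python) =====
-- import math
--
-- def getIthMultiset(i, n, k):
--     if i < 0 or i >= math.comb(n + k - 1, k):
--         raise ValueError("In the function "
--                 "getIthNondecreasingKTuple(), the given value "
--                 "of i was outside the valid range for the "
--                 "given n and k.")
--     res = {}
--     cur_i, cur_n, prev, level = i, n, 0, k
--     while level > 0:
--         tot = math.comb(cur_n + level - 1, level)
--         target = tot - cur_i
--         lo, hi = 0, cur_n - 1
--         while lo < hi:
--             mid = lo + (hi - lo + 1) // 2
--             if math.comb(cur_n - mid + level - 1, level) >= target: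
--                 lo = mid
--             else:
--                 hi = mid - 1
--         num = prev + lo
--         res[num] = res.get(num, 0) + 1
--         cur_i = math.comb(cur_n - lo + level - 1, level) - target
--         cur_n -= lo
--         prev = num
--         level -= 1
--     return res
-- ===== Notes on version B (the rewrite author's own statement) =====
-- stated objective: simpler
-- what changed: Replaces A's inner recursive closure that appends to a list (then a separate pass folding the tuple into a counting dict) by a single iterative while-loop that carries the state (i, n, prev, level) in locals and increments the counting dict in place; same binary search per level, no helper function and no intermediate tuple.
import Mathlib
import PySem

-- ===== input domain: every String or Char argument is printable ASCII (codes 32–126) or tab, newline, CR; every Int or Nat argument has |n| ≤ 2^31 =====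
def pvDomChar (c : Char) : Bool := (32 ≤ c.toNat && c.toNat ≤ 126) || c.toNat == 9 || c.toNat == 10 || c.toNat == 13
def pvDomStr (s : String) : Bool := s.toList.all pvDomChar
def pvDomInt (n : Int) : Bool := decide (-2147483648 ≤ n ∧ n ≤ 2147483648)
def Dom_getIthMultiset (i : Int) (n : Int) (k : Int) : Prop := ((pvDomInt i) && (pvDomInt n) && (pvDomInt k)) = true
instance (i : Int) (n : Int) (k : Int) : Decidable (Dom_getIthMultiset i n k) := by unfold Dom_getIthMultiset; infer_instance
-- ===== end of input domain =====

-- B replaces A's recursion-into-a-list plus a second dict-building pass by one iterative loop that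
-- maintains the counting dict directly (objective: simpler).

-- C(a, j+f) from C(a, j) by the exact prefix products C(a,j+1) = C(a,j)*(a-j)/(j+1)
def chooseDAux (a : Nat) : Nat → Nat → Nat → Nat
  | 0, _, c => c
  | f + 1, j, c => chooseDAux a f (j + 1) (c * (a - j) / (j + 1))

def chooseD (a : Nat) (m : Nat) : Nat := chooseDAux a m 0 1

-- math.comb a b: exact for 0 ≤ a, 0 ≤ b (Python raises ValueError on negative arguments; those
-- evaluations are outside Pre_, where this total form returns 0).  Like CPython, the product is
-- taken over the smaller of b and a - b.
def pyComb (a : Int) (b : Int) : Int :=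
  if a < 0 ∨ b < 0 then 0
  else if a < b then 0
  else ((chooseD a.toNat (min b.toNat (a.toNat - b.toNat)) : Nat) : Int)

-- ===== PORT A =====
def countFunctionNondecreasing (n : Int) (k : Int) : Int := pyComb (n + k - 1) k

-- the inner `while lft < rgt` loop of A's recur (allow_repeats=True branch); fuel only makes the
-- loop total: the measure rgt - lft shrinks by ≥ 1 per step, so (rgt - lft).toNat + 1 always suffices
def bsearchAGo (fuel : Nat) (lft : Int) (rgt : Int) (n : Int) (k : Int) (target : Int) : Int :=
  match fuel with
  | 0 => lft
  | f + 1 =>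
    if lft < rgt then
      let mid := lft - PySem.Int.floordiv (lft - rgt) 2   -- lft - ((lft - rgt) >> 1)
      if target ≤ countFunctionNondecreasing (n - mid) k then bsearchAGo f mid rgt n k target
      else bsearchAGo f lft (mid - 1) n k target
    else lft

def bsearchA (lft : Int) (rgt : Int) (n : Int) (k : Int) (target : Int) : Int :=
  bsearchAGo ((rgt - lft).toNat + 1) lft rgt n k target

-- A's recur: returns the list of numbers appended to res, in order.  Python recurses on k,
-- stopping at `if not k`; inside Pre_ k ≥ 0, so k is carried as the Nat fuel (k = fuel exactly).
def recurAGo (fuel : Nat) (i : Int) (n : Int) (prev : Int) : List Int :=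
  match fuel with
  | 0 => []                                  -- if not k: return
  | f + 1 =>
    let k : Int := (f : Int) + 1
    let tot := countFunctionNondecreasing n k
    let target := tot - i
    let lft := bsearchA 0 (n - 1) n k target
    let num := prev + lft
    num :: recurAGo f (countFunctionNondecreasing (n - lft) k - target) (n - lft) num

def getIthMultiset (i : Int) (n : Int) (k : Int) : List (Int × Int) :=
  if i < 0 ∨ countFunctionNondecreasing n k ≤ i then []   -- raise ValueError (also where math.comb raises) — outside Pre_
  else
    ((recurAGo k.toNat i n 0).foldl (fun d num => d.insert num (d.getD num 0 + 1))
      (PySem.Dict.empty : PySem.Dict Int Int)).items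

-- ===== PORT B =====
-- B's inner `while lo < hi` loop, same fuel device
def bsearchBGo (fuel : Nat) (lo : Int) (hi : Int) (cur_n : Int) (level : Int) (target : Int) : Int :=
  match fuel with
  | 0 => lo
  | f + 1 =>
    if lo < hi then
      let mid := lo + PySem.Int.floordiv (hi - lo + 1) 2
      if target ≤ pyComb (cur_n - mid + level - 1) level then bsearchBGo f mid hi cur_n level target
      else bsearchBGo f lo (mid - 1) cur_n level target
    else lo

def bsearchB (lo : Int) (hi : Int) (cur_n : Int) (level : Int) (target : Int) : Int :=
  bsearchBGo ((hi - lo).toNat + 1) lo hi cur_n level target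

-- B's outer `while level > 0` loop, carrying the dict and the scalars; level counts down by 1,
-- so inside Pre_ it is exactly the Nat fuel
def loopBGo (fuel : Nat) (res : PySem.Dict Int Int) (cur_i : Int) (cur_n : Int) (prev : Int) :
    PySem.Dict Int Int :=
  match fuel with
  | 0 => res
  | f + 1 =>
    let level : Int := (f : Int) + 1
    let tot := pyComb (cur_n + level - 1) level
    let target := tot - cur_i
    let lo := bsearchB 0 (cur_n - 1) cur_n level target
    let num := prev + lo
    loopBGo f (res.insert num (res.getD num 0 + 1))
      (pyComb (cur_n - lo + level - 1) level - target) (cur_n - lo) num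

def getIthMultiset_alt (i : Int) (n : Int) (k : Int) : List (Int × Int) :=
  if i < 0 ∨ pyComb (n + k - 1) k ≤ i then []   -- raise ValueError — outside Pre_
  else (loopBGo k.toNat PySem.Dict.empty i n 0).items

-- ===== PRECONDITION & SPEC =====
-- Pre_ is exactly where A returns normally: i in [0, C(n+k-1,k)) and n ≥ 1, k ≥ 0
-- (outside this A raises ValueError, from its own check or from math.comb on a negative argument).
-- The last conjunct is exactly `i < C(n+k-1, k)` (the top-level ValueError check) on the Dom:
-- when min k (n-1) > 32 the binomial exceeds 2^33 > |i|, and otherwise it equals the falling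
-- factorial over the factorial, C(a, m) = a!/(a-m)!/m! with m = min k (n-1); math.comb's
-- arguments are nonnegative by the other conjuncts.
def Pre_getIthMultiset (i : Int) (n : Int) (k : Int) : Prop :=
  0 ≤ i ∧ 0 ≤ k ∧ 1 ≤ n ∧
    (32 < min k (n - 1) ∨
      i < ((Nat.descFactorial (n + k - 1).toNat (min k.toNat (n - 1).toNat)
              / Nat.factorial (min k.toNat (n - 1).toNat) : Nat) : Int))
instance (i : Int) (n : Int) (k : Int) : Decidable (Pre_getIthMultiset i n k) := by
  unfold Pre_getIthMultiset; infer_instance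

def pvWitness_getIthMultiset : Int × Int × Int := (3, 4, 2)

def Spec_getIthMultiset (i : Int) (n : Int) (k : Int) (out : List (Int × Int)) : Prop := out = getIthMultiset_alt i n k
instance (i : Int) (n : Int) (k : Int) (out : List (Int × Int)) : Decidable (Spec_getIthMultiset i n k out) := by unfold Spec_getIthMultiset; infer_instance

-- ===== CLAIM (what is proved, stated in full; the proofs are below) =====
def Claim_equal_getIthMultiset : Prop := ∀ (i : Int) (n : Int) (k : Int), Dom_getIthMultiset i n k → Pre_getIthMultiset i n k → Spec_getIthMultiset i n k (getIthMultiset i n k)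

-- ===== LEMMAS AND PROOFS =====

lemma chooseD_step (a j : Nat) : a.choose j * (a - j) / (j + 1) = a.choose (j + 1) := by
  rw [← Nat.choose_succ_right_eq]
  exact Nat.mul_div_cancel _ (Nat.succ_pos j)

lemma chooseDAux_spec (a : Nat) : ∀ (f j : Nat), chooseDAux a f j (a.choose j) = a.choose (j + f) := by
  intro f
  induction f with
  | zero => intro j; simp [chooseDAux]
  | succ f ih =>
      intro j
      show chooseDAux a f (j + 1) (a.choose j * (a - j) / (j + 1)) = _
      rw [chooseD_step, ih (j + 1)]
      congr 1
      omega

lemma chooseD_eq (a m : Nat) : chooseD a m = a.choose m := by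
  have h := chooseDAux_spec a m 0
  simpa [chooseD, Nat.choose_zero_right] using h

lemma choose_min_eq (a b : Nat) (h : b ≤ a) : a.choose (min b (a - b)) = a.choose b := by
  rcases le_total b (a - b) with hb | hb
  · rw [min_eq_left hb]
  · rw [min_eq_right hb, Nat.choose_symm h]

lemma chooseD_min_eq (a b : Nat) (h : b ≤ a) : chooseD a (min b (a - b)) = a.choose b := by
  rw [chooseD_eq]
  rcases le_total b (a - b) with hb | hb
  · rw [min_eq_left hb]
  · rw [min_eq_right hb, Nat.choose_symm h]

lemma pyComb_eq (a b : Int) (ha : 0 ≤ a) (hb : 0 ≤ b) :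
    pyComb a b = ((a.toNat.choose b.toNat : Nat) : Int) := by
  unfold pyComb
  rw [if_neg (by omega)]
  by_cases h : a < b
  · rw [if_pos h, Nat.choose_eq_zero_of_lt (by omega)]
    simp
  · rw [if_neg h, chooseD_min_eq _ _ (by omega)]

-- C(a, b) ≥ C(2s, s) ≥ C(66, 33) > 2^31 + 1 when both sides of the binomial are ≥ 33
lemma central_le {s a : Nat} (h33 : 33 ≤ s) (h : 2 * s ≤ a) :
    (2147483649 : Nat) ≤ a.choose s := by
  have h1 : (66).choose 33 = 7219428434016265740 := by rw [← chooseD_eq]; rfl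
  have h2 : (66).choose 33 ≤ (2 * s).choose 33 := Nat.choose_le_choose 33 (by omega)
  have h2' : (2 * s).choose 33 ≤ (2 * s).choose ((2 * s) / 2) := Nat.choose_le_middle 33 (2 * s)
  have hhalf : (2 * s) / 2 = s := by omega
  have h3 : (2 * s).choose s ≤ a.choose s := Nat.choose_le_choose s h
  rw [hhalf] at h2'
  omega

lemma choose_big {a b : Nat} (hb : 33 ≤ b) (hab : 33 ≤ a - b) (hba : b ≤ a) :
    (2147483649 : Nat) ≤ a.choose b := by
  rcases le_total b (a - b) with h | h
  · exact central_le hb (by omega)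
  · have hs : a.choose (a - b) = a.choose b := Nat.choose_symm hba
    rw [← hs]
    exact central_le hab (by omega)

-- A's midpoint lft - ((lft - rgt) >> 1) equals B's lo + (hi - lo + 1) // 2
lemma mid_eq (l r : Int) :
    l - PySem.Int.floordiv (l - r) 2 = l + PySem.Int.floordiv (r - l + 1) 2 := by
  rw [PySem.Int.floordiv_eq_ediv_of_pos (by norm_num),
     PySem.Int.floordiv_eq_ediv_of_pos (by norm_num)]
  omega

-- the two binary searches compute the same value (step by step, any fuel)
lemma bsearchGo_eq (fuel : Nat) : ∀ (lft rgt n k target : Int),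
    bsearchAGo fuel lft rgt n k target = bsearchBGo fuel lft rgt n k target := by
  induction fuel with
  | zero => intro lft rgt n k t; rfl
  | succ f ih =>
      intro lft rgt n k t
      simp only [bsearchAGo, bsearchBGo, countFunctionNondecreasing, ← mid_eq lft rgt]
      split_ifs <;> simp [ih]

lemma bsearch_eq (lft rgt n k target : Int) :
    bsearchA lft rgt n k target = bsearchB lft rgt n k target :=
  bsearchGo_eq _ lft rgt n k target

-- folding the counting update over A's list equals B's loop, from any starting dict and state
lemma fold_recurA_eq_loopB (fuel : Nat) : ∀ (i n prev : Int) (d : PySem.Dict Int Int),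
    (recurAGo fuel i n prev).foldl (fun d num => d.insert num (d.getD num 0 + 1)) d
      = loopBGo fuel d i n prev := by
  induction fuel with
  | zero => intro i n prev d; rfl
  | succ f ih =>
      intro i n prev d
      simp only [recurAGo, loopBGo, countFunctionNondecreasing, List.foldl_cons, bsearch_eq, ih]

-- ===== VERDICT (by name: the statement is the Claim_ definition above) =====
theorem getIthMultiset_spec : Claim_equal_getIthMultiset := by
  intro i n k hdom hpre
  obtain ⟨hi, hk, hn, hor⟩ := hpre
  simp only [Dom_getIthMultiset, pvDomInt, Bool.and_eq_true, decide_eq_true_eq] at hdom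
  -- i is within range of the top-level ValueError check
  have hlt : i < ((((n + k - 1).toNat.choose k.toNat : Nat)) : Int) := by
    rcases hor with h32 | hsmall
    · have hbig := choose_big (a := (n + k - 1).toNat) (b := k.toNat)
        (by omega) (by omega) (by omega)
      omega
    · rw [← Nat.choose_eq_descFactorial_div_factorial] at hsmall
      have hmin : min k.toNat (n - 1).toNat
          = min k.toNat ((n + k - 1).toNat - k.toNat) := by omega
      rw [hmin, choose_min_eq _ _ (by omega)] at hsmall
      exact hsmall
  unfold Spec_getIthMultiset getIthMultiset getIthMultiset_alt
  have hcomb : countFunctionNondecreasing n k = (((n + k - 1).toNat.choose k.toNat : Nat) : Int) := by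
    unfold countFunctionNondecreasing
    exact pyComb_eq _ _ (by omega) hk
  rw [if_neg (by rw [hcomb]; omega)]
  rw [if_neg (by
    show ¬ (i < 0 ∨ pyComb (n + k - 1) k ≤ i)
    have h : pyComb (n + k - 1) k = countFunctionNondecreasing n k := rfl
    rw [h, hcomb]; omega)]
  rw [fold_recurA_eq_loopB]
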